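-- pv_equiv track=rewrite | github.com/RomanRetsen/code_clash | walker_tasks/spatula.py | pancake_scramble
-- ===== SOURCE A (Python) =====
-- def pancake_scramble(text):
--     the_list = list(text)
--     for i in range(2, len(text) + 1):
--         start_temp = list(reversed(the_list[:i]))
--         end_temp = the_list[i:]
--         the_list.clear()
--         the_list = start_temp + end_temp
--     return "".join(the_list)
-- ===== SOURCE B (Python) =====
-- def pancake_scramble(text):
--     rev, fwd = [], []
--     for i, ch in enumerate(text):
--         if i % 2 == len(text) % 2:
--             fwd.append(ch)
--         else:
--             rev.append(ch)
--     return "".join(reversed(rev)) + "".join(fwd)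
-- ===== Notes on version B (the rewrite author's own statement) =====
-- stated objective: faster
-- what changed: Replaces the loop of successive prefix reversals (rebuilding the whole list each iteration) by a single pass that routes each character, by index parity relative to the length's parity, into a reversed-emitted part and a forward-emitted part.
import Mathlib
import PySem

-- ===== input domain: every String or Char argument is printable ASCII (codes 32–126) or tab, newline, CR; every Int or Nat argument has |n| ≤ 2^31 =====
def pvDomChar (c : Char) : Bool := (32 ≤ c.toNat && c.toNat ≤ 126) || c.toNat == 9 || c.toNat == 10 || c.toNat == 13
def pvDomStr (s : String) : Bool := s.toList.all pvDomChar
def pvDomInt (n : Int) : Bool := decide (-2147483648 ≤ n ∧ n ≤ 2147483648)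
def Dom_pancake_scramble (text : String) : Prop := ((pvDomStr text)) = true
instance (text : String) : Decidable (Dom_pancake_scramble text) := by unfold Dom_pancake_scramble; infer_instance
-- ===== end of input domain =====

-- B replaces A's quadratic loop of successive prefix reversals by a single pass that splits
-- the characters by index parity (relative to the length's parity) into a part emitted
-- reversed and a part emitted forward; objective: faster.

-- ===== PORT A =====
-- one iteration of A's loop body: the_list = list(reversed(the_list[:i])) + the_list[i:]
def pvStepA (the_list : List Char) (i : Int) : List Char :=
  (PySem.List.slice the_list none (some i)).reverse ++ PySem.List.slice the_list (some i) none

def pancake_scramble (text : String) : String :=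
  let the_list := text.toList
  let res := (PySem.List.pyRange 2 (PySem.Str.len text + 1) 1).foldl pvStepA the_list
  String.ofList res

-- ===== PORT B =====
-- one iteration of B's loop body over enumerate(text): i % 2 == len(text) % 2
def pvStepB (p : Int) (acc : List Char × List Char) (ich : Int × Char) : List Char × List Char :=
  if PySem.Int.mod ich.1 2 = p then (acc.1, acc.2 ++ [ich.2]) else (acc.1 ++ [ich.2], acc.2)

def pancake_scramble_alt (text : String) : String :=
  let p := PySem.Int.mod (PySem.Str.len text) 2
  let rf := (PySem.List.enumerate text.toList 0).foldl (pvStepB p) ([], [])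
  String.ofList (rf.1.reverse ++ rf.2)

-- ===== PRECONDITION & SPEC =====
def Spec_pancake_scramble (text : String) (out : String) : Prop := out = pancake_scramble_alt text
instance (text : String) (out : String) : Decidable (Spec_pancake_scramble text out) := by unfold Spec_pancake_scramble; infer_instance

-- ===== CLAIM (what is proved, stated in full; the proofs are below) =====
def Claim_equal_pancake_scramble : Prop := ∀ (text : String), Dom_pancake_scramble text → Spec_pancake_scramble text (pancake_scramble text)

-- ===== LEMMAS AND PROOFS =====

-- elements at even positions / odd positions
def pvEvens : List Char → List Char
  | [] => []
  | [a] => [a]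
  | a :: _ :: t => a :: pvEvens t

def pvOdds : List Char → List Char
  | [] => []
  | _ :: t => pvEvens t

-- the common closed form both ports compute
def pvC (l : List Char) : List Char :=
  if l.length % 2 = 0 then (pvOdds l).reverse ++ pvEvens l else (pvEvens l).reverse ++ pvOdds l

theorem pvEvens_cons (a : Char) (t : List Char) : pvEvens (a :: t) = a :: pvOdds t := by
  cases t <;> simp [pvEvens, pvOdds]

theorem pvOdds_cons (a : Char) (t : List Char) : pvOdds (a :: t) = pvEvens t := rfl

theorem pvEvens_odds_append (l : List Char) (x : Char) :
    pvEvens (l ++ [x]) = (if l.length % 2 = 0 then pvEvens l ++ [x] else pvEvens l) ∧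
    pvOdds (l ++ [x]) = (if l.length % 2 = 0 then pvOdds l else pvOdds l ++ [x]) := by
  induction l with
  | nil => simp [pvEvens, pvOdds]
  | cons a t ih =>
    obtain ⟨h1, h2⟩ := ih
    constructor
    · rw [List.cons_append, pvEvens_cons, pvEvens_cons, h2]
      by_cases hm : t.length % 2 = 0
      · rw [if_pos hm, if_neg (by simp; omega)]
      · rw [if_neg hm, if_pos (by simp; omega)]
        simp
    · rw [List.cons_append, pvOdds_cons, pvOdds_cons, h1]
      by_cases hm : t.length % 2 = 0
      · rw [if_pos hm, if_neg (by simp; omega)]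
      · rw [if_neg hm, if_pos (by simp; omega)]

theorem pvEvens_odds_length (l : List Char) :
    (pvEvens l).length + (pvOdds l).length = l.length := by
  induction l with
  | nil => simp [pvEvens, pvOdds]
  | cons a t ih => rw [pvEvens_cons, pvOdds_cons]; simp only [List.length_cons]; omega

theorem pvC_length (l : List Char) : (pvC l).length = l.length := by
  have h := pvEvens_odds_length l
  unfold pvC; split <;> simp <;> omega

theorem pvC_append (l : List Char) (x : Char) : pvC (l ++ [x]) = x :: (pvC l).reverse := by
  obtain ⟨h1, h2⟩ := pvEvens_odds_append l x
  have hL : (l ++ [x]).length % 2 = (l.length + 1) % 2 := by simp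
  by_cases hm : l.length % 2 = 0
  · have e1 : pvEvens (l ++ [x]) = pvEvens l ++ [x] := by rw [h1, if_pos hm]
    have e2 : pvOdds (l ++ [x]) = pvOdds l := by rw [h2, if_pos hm]
    have hL1 : (l ++ [x]).length % 2 = 1 := by omega
    unfold pvC
    rw [hL1, if_neg one_ne_zero, e1, e2, if_pos hm]
    simp
  · have e1 : pvEvens (l ++ [x]) = pvEvens l := by rw [h1, if_neg hm]
    have e2 : pvOdds (l ++ [x]) = pvOdds l ++ [x] := by rw [h2, if_neg hm]
    have hL0 : (l ++ [x]).length % 2 = 0 := by omega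
    unfold pvC
    rw [hL0, if_pos rfl, e1, e2, if_neg hm]
    simp

theorem pvLen_stepA (l : List Char) (i : Int) (hi : 0 ≤ i) :
    (pvStepA l i).length = l.length := by
  unfold pvStepA
  rw [PySem.List.slice_to l hi, PySem.List.slice_from l hi]
  simp; omega

theorem pvLen_foldA (b : Nat) (l : List Char) :
    ((PySem.List.pyRange 2 ((b : Int) + 1) 1).foldl pvStepA l).length = l.length := by
  induction b generalizing l with
  | zero =>
    rw [show (((0:Nat)):Int) + 1 = 1 from by norm_num,
      PySem.List.pyRange_one_eq_nil (by norm_num : (1:Int) ≤ 2)]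
    rfl
  | succ n ih =>
    by_cases h : 2 ≤ (n : Int) + 1
    · have e2 : (((n + 1 : Nat)) : Int) + 1 = ((n : Int) + 1) + 1 := by push_cast; ring
      rw [e2, PySem.List.pyRange_one_succ_right h, List.foldl_append]
      simp only [List.foldl_cons, List.foldl_nil]
      rw [pvLen_stepA _ _ (by omega), ih]
    · have e2 : (((n + 1 : Nat)) : Int) + 1 ≤ 2 := by
        have : (n : Int) + 1 < 2 := by omega
        push_cast; omega
      rw [PySem.List.pyRange_one_eq_nil e2]; rfl

-- steps 2..b leave a trailing element of the list untouched
theorem pvFoldA_append (b : Nat) (l : List Char) (x : Char) (hb : b ≤ l.length) :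
    (PySem.List.pyRange 2 ((b : Int) + 1) 1).foldl pvStepA (l ++ [x]) =
      ((PySem.List.pyRange 2 ((b : Int) + 1) 1).foldl pvStepA l) ++ [x] := by
  induction b generalizing l with
  | zero =>
    rw [show (((0:Nat)):Int) + 1 = 1 from by norm_num,
      PySem.List.pyRange_one_eq_nil (by norm_num : (1:Int) ≤ 2)]
    rfl
  | succ n ih =>
    by_cases h : 2 ≤ (n : Int) + 1
    · have e2 : (((n + 1 : Nat)) : Int) + 1 = ((n : Int) + 1) + 1 := by push_cast; ring
      rw [e2, PySem.List.pyRange_one_succ_right h, List.foldl_append, List.foldl_append]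
      simp only [List.foldl_cons, List.foldl_nil]
      rw [ih l (by omega)]
      have hlen : ((PySem.List.pyRange 2 ((n : Int) + 1) 1).foldl pvStepA l).length = l.length :=
        pvLen_foldA n l
      generalize (PySem.List.pyRange 2 ((n : Int) + 1) 1).foldl pvStepA l = m at hlen ⊢
      have hn1 : n + 1 ≤ m.length := by omega
      have c1 : ((n:Int) + 1) = ((n + 1 : Nat) : Int) := by push_cast; ring
      rw [c1]
      unfold pvStepA
      rw [PySem.List.slice_to_natCast, PySem.List.slice_to_natCast,
        PySem.List.slice_from_natCast, PySem.List.slice_from_natCast,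
        List.take_append_of_le_length hn1, List.drop_append_of_le_length hn1,
        List.append_assoc]
    · have e2 : (((n + 1 : Nat)) : Int) + 1 ≤ 2 := by
        have : (n : Int) + 1 < 2 := by omega
        push_cast; omega
      rw [PySem.List.pyRange_one_eq_nil e2]; rfl

theorem pvFoldA_closed (l : List Char) :
    (PySem.List.pyRange 2 ((l.length : Int) + 1) 1).foldl pvStepA l = pvC l := by
  induction l using List.reverseRecOn with
  | nil =>
    rw [PySem.List.pyRange_one_eq_nil (by simp : ((([]:List Char).length : Int)) + 1 ≤ 2)]
    rfl
  | append_singleton l x ih =>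
    rcases eq_or_ne l [] with rfl | hne
    · rw [PySem.List.pyRange_one_eq_nil (by simp : ((([]:List Char) ++ [x]).length : Int) + 1 ≤ 2)]
      simp [pvC, pvEvens, pvOdds]
    · have hn : 1 ≤ l.length := List.length_pos_iff.mpr hne
      have e : (((l ++ [x]).length : Int)) + 1 = ((l.length : Int) + 1) + 1 := by
        simp [List.length_append]
      rw [e, PySem.List.pyRange_one_succ_right (by omega : (2:Int) ≤ (l.length : Int) + 1),
        List.foldl_append]
      simp only [List.foldl_cons, List.foldl_nil]
      rw [pvFoldA_append l.length l x le_rfl, ih]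
      -- the final step i = len reverses the whole list
      have c1 : ((l.length : Int) + 1) = (((l.length + 1 : Nat)) : Int) := by push_cast; ring
      rw [c1]
      unfold pvStepA
      rw [PySem.List.slice_to_natCast, PySem.List.slice_from_natCast, pvC_append]
      have hlenC : (pvC l ++ [x]).length = l.length + 1 := by simp [pvC_length]
      rw [List.take_of_length_le (by omega), List.drop_eq_nil_of_le (by omega)]
      simp

-- B's fold over enumerate, with accumulators, computes the parity split
theorem pvFoldB (p : Int) (hp : p = 0 ∨ p = 1) (l : List Char) : ∀ (s : Int) (r f : List Char),
    (PySem.List.enumerate l s).foldl (pvStepB p) (r, f) =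
      if PySem.Int.mod s 2 = p then (r ++ pvOdds l, f ++ pvEvens l)
      else (r ++ pvEvens l, f ++ pvOdds l) := by
  induction l with
  | nil =>
    intro s r f
    rw [PySem.List.enumerate_nil]
    simp [pvEvens, pvOdds]
  | cons a t ih =>
    intro s r f
    rw [PySem.List.enumerate_cons, List.foldl_cons]
    have hmods : PySem.Int.mod s 2 = s % 2 := PySem.Int.mod_eq_emod_of_pos (a := s) (by norm_num)
    have hmods1 : PySem.Int.mod (s + 1) 2 = (s + 1) % 2 :=
      PySem.Int.mod_eq_emod_of_pos (a := s + 1) (by norm_num)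
    by_cases h : PySem.Int.mod s 2 = p
    · have h1 : ¬ PySem.Int.mod (s + 1) 2 = p := by omega
      have h' : s % 2 = p := hmods ▸ h
      have hstep : pvStepB p (r, f) (s, a) = (r, f ++ [a]) := by simp [pvStepB, h']
      rw [hstep, ih (s + 1) r (f ++ [a]), if_neg h1, if_pos h, pvEvens_cons, pvOdds_cons]
      simp
    · have h1 : PySem.Int.mod (s + 1) 2 = p := by omega
      have h' : ¬ s % 2 = p := fun hc => h (hmods ▸ hc)
      have hstep : pvStepB p (r, f) (s, a) = (r ++ [a], f) := by simp [pvStepB, h']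
      rw [hstep, ih (s + 1) (r ++ [a]) f, if_pos h1, if_neg h, pvEvens_cons, pvOdds_cons]
      simp

-- ===== VERDICT (by name: the statement is the Claim_ definition above) =====
theorem pancake_scramble_spec : Claim_equal_pancake_scramble := by
  intro text _
  show pancake_scramble text = pancake_scramble_alt text
  unfold pancake_scramble pancake_scramble_alt
  dsimp only
  rw [PySem.Str.len_eq]
  set l := text.toList with hl
  have hp : PySem.Int.mod (l.length : Int) 2 = ((l.length % 2 : Nat) : Int) := by
    exact_mod_cast PySem.Int.mod_natCast l.length 2
  have hp01 : PySem.Int.mod (l.length : Int) 2 = 0 ∨ PySem.Int.mod (l.length : Int) 2 = 1 := by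
    rw [hp]; rcases Nat.even_or_odd l.length with h | h
    · left; rw [Nat.even_iff.mp h]; rfl
    · right; rw [Nat.odd_iff.mp h]; rfl
  rw [pvFoldA_closed, pvFoldB _ hp01 l 0]
  have h0 : PySem.Int.mod 0 2 = 0 := by decide
  rw [h0, hp]
  rcases Nat.even_or_odd l.length with h | h
  · have hm : l.length % 2 = 0 := Nat.even_iff.mp h
    rw [hm, if_pos (by norm_num)]
    simp [pvC, hm]
  · have hm : l.length % 2 = 1 := Nat.odd_iff.mp h
    rw [hm, if_neg (by norm_num)]
    simp [pvC, hm]
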